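-- pv_equiv track=rewrite | github.com/daniel-reich/ubiquitous-fiesta | 82AvsFFQprj43XCDS_9.py | no_strangers
-- ===== SOURCE A (Python) =====
-- def no_strangers(txt):
--     t = txt.translate(str.maketrans('', '', '!"#$%&()*+,-./:;<=>?@[\]^_`{|}~')).lower().split()
--     frequency = {}
--     a = {3: [], 5: []}
--     for x in t:
--         frequency[x] = frequency.get(x, 0) + 1
--         if frequency[x] == 3:
--             a[3].append(x)
--         elif frequency[x] == 5:
--             a[3].remove(x)
--             a[5].append(x)
--     return [x for x in a.values()]
-- ===== SOURCE B (Python) =====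
-- def no_strangers(txt):
--     t = txt.translate(str.maketrans('', '', '!"#$%&()*+,-./:;<=>?@[\]^_`{|}~')).lower().split()
--     freq3 = [w for i, w in enumerate(t) if t[:i + 1].count(w) == 3 and t.count(w) < 5]
--     freq5 = [w for i, w in enumerate(t) if t[:i + 1].count(w) == 5]
--     return [freq3, freq5]
-- ===== Notes on version B (the rewrite author's own statement) =====
-- stated objective: simpler
-- what changed: B replaces A's stateful dict-and-remove loop by two declarative comprehensions: a word goes to freq3 at the index where its running prefix count is 3 provided its total count stays below 5, and to freq5 at the index where the prefix count is 5; no dict state and no list.remove.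
import Mathlib
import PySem

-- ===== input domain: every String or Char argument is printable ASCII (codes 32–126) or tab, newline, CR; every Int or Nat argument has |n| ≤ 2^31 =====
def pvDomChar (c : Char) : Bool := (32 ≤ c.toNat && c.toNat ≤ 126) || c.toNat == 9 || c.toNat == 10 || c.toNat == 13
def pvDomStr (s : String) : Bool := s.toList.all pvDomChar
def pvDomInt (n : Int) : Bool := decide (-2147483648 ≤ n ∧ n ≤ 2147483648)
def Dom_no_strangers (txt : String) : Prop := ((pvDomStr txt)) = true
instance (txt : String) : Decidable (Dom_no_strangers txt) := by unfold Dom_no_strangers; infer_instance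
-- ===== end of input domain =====

-- B replaces A's stateful dict-and-remove loop by two declarative comprehensions over
-- (index, word) pairs, picking the 3rd/5th occurrence by prefix counts (objective: simpler).

-- ===== PORT A =====
-- punctuation deleted by A's str.maketrans deletion table (note: no apostrophe)
def pvPunct : List Char := "!\"#$%&()*+,-./:;<=>?@[\\]^_`{|}~".toList

-- txt.translate(deletion table).lower().split(): translate-with-deletions is ported by hand as a
-- char filter (exact: the table only deletes), then PySem lower/split
def pvTokens (txt : String) : List String :=
  PySem.Str.split₀ (PySem.Str.lower (String.ofList (txt.toList.filter (fun c => !(pvPunct.contains c)))))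

-- one iteration of A's loop over (frequency, a[3], a[5]); a is a fixed-key dict, ported as two lists.
-- a[3].remove(x): remove? never fails here (x was appended at count 3); getD keeps the list total.
def pvStepA (s : PySem.Dict String Int × List String × List String) (x : String) :
    PySem.Dict String Int × List String × List String :=
  let frequency := s.1.insert x (s.1.getD x 0 + 1)
  if frequency.getD x 0 == 3 then (frequency, s.2.1 ++ [x], s.2.2)
  else if frequency.getD x 0 == 5 then
    (frequency, (PySem.List.remove? s.2.1 x).getD s.2.1, s.2.2 ++ [x])
  else (frequency, s.2.1, s.2.2)

def no_strangers (txt : String) : List (List String) :=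
  let t := pvTokens txt
  let r := t.foldl pvStepA (PySem.Dict.empty, [], [])
  [r.2.1, r.2.2]

-- ===== PORT B =====
-- the two comprehensions of Source B: t[:i+1] is PySem slice, list.count is PySem.List.count
def no_strangers_alt (txt : String) : List (List String) :=
  let t := pvTokens txt
  [((PySem.List.enumerate t 0).filter (fun q =>
      (PySem.List.count (PySem.List.slice t none (some (q.1 + 1))) q.2 == 3)
        && decide (PySem.List.count t q.2 < 5))).map (·.2),
   ((PySem.List.enumerate t 0).filter (fun q =>
      PySem.List.count (PySem.List.slice t none (some (q.1 + 1))) q.2 == 5)).map (·.2)]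

-- ===== PRECONDITION & SPEC =====
def Spec_no_strangers (txt : String) (out : List (List String)) : Prop := out = no_strangers_alt txt
instance (txt : String) (out : List (List String)) : Decidable (Spec_no_strangers txt out) := by unfold Spec_no_strangers; infer_instance

-- ===== CLAIM (what is proved, stated in full; the proofs are below) =====
def Claim_equal_no_strangers : Prop := ∀ (txt : String), Dom_no_strangers txt → Spec_no_strangers txt (no_strangers txt)

-- ===== LEMMAS AND PROOFS =====

-- Nat-index forms of B's two comprehensions (the proof's working objects)
def pvF3 (p : List String) : List String :=
  ((PySem.List.enumerate p 0).filter (fun q =>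
    ((p.take (q.1.toNat + 1)).count q.2 == 3) && decide (p.count q.2 < 5))).map (·.2)

def pvF5 (p : List String) : List String :=
  ((PySem.List.enumerate p 0).filter (fun q =>
    (p.take (q.1.toNat + 1)).count q.2 == 5)).map (·.2)

lemma pv_mem_enum (t : List String) (q : Int × String) (h : q ∈ PySem.List.enumerate t 0) :
    ∃ (k : Nat) (hk : k < t.length), q = ((k : Int), t[k]) := by
  have := (PySem.List.mem_enumerate_iff t 0 q).1 h
  simpa using this

lemma pv_alt_gen (t : List String) :
    [((PySem.List.enumerate t 0).filter (fun q =>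
        (PySem.List.count (PySem.List.slice t none (some (q.1 + 1))) q.2 == 3)
          && decide (PySem.List.count t q.2 < 5))).map (·.2),
     ((PySem.List.enumerate t 0).filter (fun q =>
        PySem.List.count (PySem.List.slice t none (some (q.1 + 1))) q.2 == 5)).map (·.2)]
      = [pvF3 t, pvF5 t] := by
  unfold pvF3 pvF5
  have hsl : ∀ (q : Int × String), q ∈ PySem.List.enumerate t 0 →
      PySem.List.slice t none (some (q.1 + 1)) = t.take (q.1.toNat + 1) := by
    intro q hq
    obtain ⟨k, hk, rfl⟩ := pv_mem_enum _ _ hq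
    rw [show ((k : Int) + 1) = ((k + 1 : Nat) : Int) by push_cast; ring, PySem.List.slice_to_natCast]
    simp
  congr 1
  · exact congrArg _ (List.filter_congr (fun q hq => by
      rw [hsl q hq, PySem.List.count_eq, PySem.List.count_eq]))
  congr 1
  exact congrArg _ (List.filter_congr (fun q hq => by rw [hsl q hq, PySem.List.count_eq]))

lemma pv_alt_eq (txt : String) :
    no_strangers_alt txt = [pvF3 (pvTokens txt), pvF5 (pvTokens txt)] := by
  unfold no_strangers_alt
  exact pv_alt_gen (pvTokens txt)

-- snoc form of enumerate
lemma pv_enum_snoc (p : List String) (x : String) :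
    PySem.List.enumerate (p ++ [x]) 0 = PySem.List.enumerate p 0 ++ [((p.length : Int), x)] := by
  rw [PySem.List.enumerate_append]
  simp [PySem.List.enumerate]

-- a prefix's count never exceeds the whole list's count
lemma pv_take_count_le (p : List String) (n : Nat) (x : String) :
    (p.take n).count x ≤ p.count x :=
  (List.take_sublist n p).count_le x

-- at most one index carries a given word with prefix-count exactly m
lemma pv_unique (p : List String) (x : String) (m : Nat) (k1 k2 : Nat) (h12 : k1 < k2)
    (h2 : k2 < p.length) (hx2 : p[k2] = x) (hc1 : (p.take (k1+1)).count x = m) :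
    (p.take (k2+1)).count x ≠ m := by
  have hsub : List.Sublist (p.take (k1+1)) (p.take k2) := by
    rw [show p.take (k1+1) = (p.take k2).take (k1+1) by
      rw [List.take_take, Nat.min_eq_left (by omega)]]
    exact List.take_sublist _ _
  have h1 : m ≤ (p.take k2).count x := hc1 ▸ hsub.count_le x
  have he : p.take (k2+1) = p.take k2 ++ [x] := by
    rw [List.take_add_one]; simp [List.getElem?_eq_getElem h2, hx2]
  rw [he]; simp [List.count_append]; omega

-- some index carries the m-th occurrence, for every 1 ≤ m ≤ total count
lemma pv_exists_occ (p : List String) (x : String) : ∀ m, 1 ≤ m → m ≤ p.count x →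
    ∃ (k : Nat) (hk : k < p.length), p[k] = x ∧ (p.take (k+1)).count x = m := by
  induction p using List.reverseRecOn with
  | nil => intro m h1 h2; simp at h2; omega
  | append_singleton p y ih =>
    intro m h1 h2
    by_cases hm : m ≤ p.count x
    · obtain ⟨k, hk, hxk, hc⟩ := ih m h1 hm
      refine ⟨k, by simp; omega, ?_, ?_⟩
      · rw [List.getElem_append_left hk]; exact hxk
      · rw [List.take_append_of_le_length (by omega)]; exact hc
    · have hyx : y = x ∧ m = p.count x + 1 := by
        rw [List.count_append, List.count_singleton] at h2
        by_cases h : y = x <;> simp [h] at h2 ⊢ <;> omega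
      refine ⟨p.length, by simp, ?_, ?_⟩
      · simp [hyx.1]
      · rw [List.take_of_length_le (by simp), List.count_append, List.count_singleton]
        simp [hyx.1, hyx.2]

lemma pv_count_snoc (p : List String) (x w : String) :
    (p ++ [x]).count w = p.count w + if x = w then 1 else 0 := by
  simp [List.count_append, List.count_singleton]

lemma pv_take_snoc (p : List String) (x : String) (k : Nat) (hk : k < p.length) :
    (p ++ [x]).take (k+1) = p.take (k+1) := by
  rw [List.take_append_of_le_length (by omega)]

lemma pvF3_snoc_hit3 (p : List String) (x : String) (h : p.count x = 2) :
    pvF3 (p ++ [x]) = pvF3 p ++ [x] := by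
  unfold pvF3
  rw [pv_enum_snoc, List.filter_append]
  have h2 : (List.filter (fun q => ((p ++ [x]).take (q.1.toNat + 1)).count q.2 == 3
      && decide ((p ++ [x]).count q.2 < 5)) [((p.length : Int), x)]) = [((p.length : Int), x)] := by
    have hc : (p ++ [x]).count x = 3 := by rw [pv_count_snoc]; simp [h]
    have ht : ((p ++ [x]).take (p.length + 1)) = p ++ [x] := List.take_of_length_le (by simp)
    simp [ht, h]
  have h1 : (List.filter (fun q => ((p ++ [x]).take (q.1.toNat + 1)).count q.2 == 3
      && decide ((p ++ [x]).count q.2 < 5)) (PySem.List.enumerate p 0))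
      = (List.filter (fun q => ((p.take (q.1.toNat + 1)).count q.2 == 3)
          && decide (p.count q.2 < 5)) (PySem.List.enumerate p 0)) := by
    apply List.filter_congr
    intro q hq
    obtain ⟨k, hk, rfl⟩ := pv_mem_enum _ _ hq
    simp only [Int.toNat_natCast, pv_take_snoc p x k hk]
    by_cases hw : p[k] = x
    · rw [hw]
      have hle : (p.take (k+1)).count x ≤ 2 := h ▸ pv_take_count_le p (k+1) x
      have hb : ((p.take (k+1)).count x == 3) = false := by simp; omega
      rw [hb]
      simp
    · have hc : (p ++ [x]).count p[k] = p.count p[k] := by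
        rw [pv_count_snoc]; simp [show ¬ (x = p[k]) from fun he => hw he.symm]
      simp [hc]
  rw [h1, h2, List.map_append, List.map_cons, List.map_nil]

lemma pvF3_snoc_hit5 (p : List String) (x : String) (h : p.count x = 4) :
    pvF3 (p ++ [x]) = (pvF3 p).filter (fun w => w != x) := by
  unfold pvF3
  rw [pv_enum_snoc, List.filter_append]
  have h2 : (List.filter (fun q => ((p ++ [x]).take (q.1.toNat + 1)).count q.2 == 3
      && decide ((p ++ [x]).count q.2 < 5)) [((p.length : Int), x)]) = [] := by
    have hc : (p ++ [x]).count x = 5 := by rw [pv_count_snoc]; simp [h]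
    have ht : ((p ++ [x]).take (p.length + 1)) = p ++ [x] := List.take_of_length_le (by simp)
    simp [ht, hc]
  have h1 : (List.filter (fun q => ((p ++ [x]).take (q.1.toNat + 1)).count q.2 == 3
      && decide ((p ++ [x]).count q.2 < 5)) (PySem.List.enumerate p 0))
      = (List.filter (fun q => (q.2 != x) && (((p.take (q.1.toNat + 1)).count q.2 == 3)
          && decide (p.count q.2 < 5))) (PySem.List.enumerate p 0)) := by
    apply List.filter_congr
    intro q hq
    obtain ⟨k, hk, rfl⟩ := pv_mem_enum _ _ hq
    simp only [Int.toNat_natCast, pv_take_snoc p x k hk]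
    by_cases hw : p[k] = x
    · rw [hw]
      have hc : (p ++ [x]).count x = 5 := by rw [pv_count_snoc]; simp [h]
      simp [hc, h]
    · have hc : (p ++ [x]).count p[k] = p.count p[k] := by
        rw [pv_count_snoc]; simp [show ¬ (x = p[k]) from fun he => hw he.symm]
      simp [hc, hw]
  rw [h1, h2, ← List.filter_filter, List.append_nil, List.filter_map]
  rfl

lemma pvF3_snoc_other (p : List String) (x : String) (h3 : p.count x ≠ 2) (h5 : p.count x ≠ 4) :
    pvF3 (p ++ [x]) = pvF3 p := by
  unfold pvF3
  rw [pv_enum_snoc, List.filter_append]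
  have h2 : (List.filter (fun q => ((p ++ [x]).take (q.1.toNat + 1)).count q.2 == 3
      && decide ((p ++ [x]).count q.2 < 5)) [((p.length : Int), x)]) = [] := by
    have hc : (p ++ [x]).count x = p.count x + 1 := by rw [pv_count_snoc]; simp
    have ht : ((p ++ [x]).take (p.length + 1)) = p ++ [x] := List.take_of_length_le (by simp)
    simp [ht, hc, show ¬ (p.count x + 1 = 3) by omega]
  have h1 : (List.filter (fun q => ((p ++ [x]).take (q.1.toNat + 1)).count q.2 == 3
      && decide ((p ++ [x]).count q.2 < 5)) (PySem.List.enumerate p 0))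
      = (List.filter (fun q => ((p.take (q.1.toNat + 1)).count q.2 == 3)
          && decide (p.count q.2 < 5)) (PySem.List.enumerate p 0)) := by
    apply List.filter_congr
    intro q hq
    obtain ⟨k, hk, rfl⟩ := pv_mem_enum _ _ hq
    simp only [Int.toNat_natCast, pv_take_snoc p x k hk]
    by_cases hw : p[k] = x
    · rw [hw]
      have hc : (p ++ [x]).count x = p.count x + 1 := by rw [pv_count_snoc]; simp
      rcases (show p.count x ≤ 1 ∨ p.count x = 3 ∨ 5 ≤ p.count x by omega) with hx | hx | hx
      · have hle : (p.take (k+1)).count x ≤ 1 := by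
          have := pv_take_count_le p (k+1) x; omega
        have hb : ((p.take (k+1)).count x == 3) = false := by simp; omega
        rw [hb]
        simp
      · simp [hc, hx]
      · simp [hc, show ¬ (p.count x < 5) by omega, show ¬ (p.count x + 1 < 5) by omega]
    · have hc : (p ++ [x]).count p[k] = p.count p[k] := by
        rw [pv_count_snoc]; simp [show ¬ (x = p[k]) from fun he => hw he.symm]
      simp [hc]
  rw [h1, h2, List.append_nil]

lemma pvF5_snoc (p : List String) (x : String) :
    pvF5 (p ++ [x]) = (if p.count x = 4 then pvF5 p ++ [x] else pvF5 p) := by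
  unfold pvF5
  rw [pv_enum_snoc, List.filter_append]
  have h1 : (List.filter (fun q => ((p ++ [x]).take (q.1.toNat + 1)).count q.2 == 5)
      (PySem.List.enumerate p 0))
      = (List.filter (fun q => (p.take (q.1.toNat + 1)).count q.2 == 5)
          (PySem.List.enumerate p 0)) := by
    apply List.filter_congr
    intro q hq
    obtain ⟨k, hk, rfl⟩ := pv_mem_enum _ _ hq
    simp only [Int.toNat_natCast, pv_take_snoc p x k hk]
  rw [h1]
  have hc : ((p ++ [x]).take (p.length + 1)).count x = p.count x + 1 := by
    rw [List.take_of_length_le (by simp), pv_count_snoc]; simp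
  by_cases h : p.count x = 4
  · rw [if_pos h]
    have h2 : (List.filter (fun q => ((p ++ [x]).take (q.1.toNat + 1)).count q.2 == 5)
        [((p.length : Int), x)]) = [((p.length : Int), x)] := by
      simp [hc, h]
    rw [h2, List.map_append, List.map_cons, List.map_nil]
  · rw [if_neg h]
    have h2 : (List.filter (fun q => ((p ++ [x]).take (q.1.toNat + 1)).count q.2 == 5)
        [((p.length : Int), x)]) = [] := by
      simp [hc, show ¬ (p.count x + 1 = 5) by omega]
    rw [h2, List.map_append, List.map_nil, List.append_nil]

lemma pvF3_nodup (p : List String) : (pvF3 p).Nodup := by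
  unfold pvF3
  have hen : (PySem.List.enumerate p 0).Nodup := by
    have h := PySem.List.pairwise_lt_enumerate p 0
    have h2 : List.Pairwise (fun (a b : Int × String) => a ≠ b) (PySem.List.enumerate p 0) := by
      refine List.Pairwise.imp ?_ h
      intro a b hlt heq
      rw [heq] at hlt
      exact absurd hlt (by omega)
    exact h2
  refine List.Nodup.map_on ?_ (hen.filter _)
  intro a ha b hb hab
  obtain ⟨ha1, ha2⟩ := List.mem_filter.1 ha
  obtain ⟨hb1, hb2⟩ := List.mem_filter.1 hb
  obtain ⟨k1, hk1, rfl⟩ := pv_mem_enum _ _ ha1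
  obtain ⟨k2, hk2, rfl⟩ := pv_mem_enum _ _ hb1
  simp only [Int.toNat_natCast, Bool.and_eq_true, beq_iff_eq, decide_eq_true_eq] at ha2 hb2
  have hx : p[k1] = p[k2] := hab
  rcases lt_trichotomy k1 k2 with h | h | h
  · have hu := pv_unique p p[k1] 3 k1 k2 h hk2 hx.symm ha2.1
    rw [← hx] at hb2
    exact absurd hb2.1 hu
  · simp [h]
  · have hu := pv_unique p p[k2] 3 k2 k1 h hk1 hx hb2.1
    rw [hx] at ha2
    exact absurd ha2.1 hu

lemma pv_mem_F3 (p : List String) (x : String) (h : p.count x = 4) : x ∈ pvF3 p := by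
  obtain ⟨k, hk, hxk, hc⟩ := pv_exists_occ p x 3 (by omega) (by omega)
  unfold pvF3
  refine List.mem_map.2 ⟨((k : Int), x), List.mem_filter.2 ⟨?_, ?_⟩, rfl⟩
  · exact (PySem.List.mem_enumerate_iff p 0 _).2 ⟨k, hk, by simp [hxk]⟩
  · simp [hc, h]

/-- A's loop, started at the state describing prefix p, lands in the state describing p ++ rest. -/
lemma pv_inv (rest : List String) : ∀ (p : List String) (freq : PySem.Dict String Int),
    (∀ w, freq.getD w 0 = (p.count w : Int)) →
    (rest.foldl pvStepA (freq, pvF3 p, pvF5 p)).2.1 = pvF3 (p ++ rest)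
    ∧ (rest.foldl pvStepA (freq, pvF3 p, pvF5 p)).2.2 = pvF5 (p ++ rest) := by
  induction rest with
  | nil => intro p freq _; simp
  | cons x rest ih =>
    intro p freq hfreq
    have hgx : (freq.insert x (freq.getD x 0 + 1)).getD x 0 = ((p.count x : Int) + 1) := by
      simp [hfreq x]
    have hfreq' : ∀ w, (freq.insert x (freq.getD x 0 + 1)).getD w 0 = (((p ++ [x]).count w : Int)) := by
      intro w
      rw [pv_count_snoc]
      by_cases hw : w = x
      · subst hw; rw [hgx]; simp
      · simp [PySem.Dict.getD_insert, hw, hfreq w, show ¬ (x = w) from fun he => hw he.symm]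
    have hstep : pvStepA (freq, pvF3 p, pvF5 p) x
        = (freq.insert x (freq.getD x 0 + 1), pvF3 (p ++ [x]), pvF5 (p ++ [x])) := by
      by_cases h3 : p.count x = 2
      · simp only [pvStepA, hgx]
        rw [pvF3_snoc_hit3 p x h3, pvF5_snoc]
        simp [h3]
      · by_cases h5 : p.count x = 4
        · simp only [pvStepA, hgx]
          have hrem : PySem.List.remove? (pvF3 p) x = some ((pvF3 p).erase x) :=
            PySem.List.remove?_eq_some_erase (pvF3 p) x (pv_mem_F3 p x h5)
          have her : (pvF3 p).erase x = (pvF3 p).filter (fun w => w != x) :=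
            (pvF3_nodup p).erase_eq_filter x
          rw [pvF3_snoc_hit5 p x h5, pvF5_snoc, hrem]
          simp [h5, her]
        · simp only [pvStepA, hgx]
          rw [pvF3_snoc_other p x h3 h5, pvF5_snoc]
          have e3 : (((p.count x : Int) + 1) == 3) = false := by simp; omega
          have e5 : (((p.count x : Int) + 1) == 5) = false := by simp; omega
          rw [e3, e5, if_neg h5]
          simp
    rw [List.foldl_cons, hstep]
    have := ih (p ++ [x]) (freq.insert x (freq.getD x 0 + 1)) hfreq'
    rwa [List.append_assoc, List.singleton_append] at this

-- ===== VERDICT (by name: the statement is the Claim_ definition above) =====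
theorem no_strangers_spec : Claim_equal_no_strangers := by
  intro txt _
  show no_strangers txt = no_strangers_alt txt
  rw [pv_alt_eq]
  unfold no_strangers
  obtain ⟨h1, h2⟩ := pv_inv (pvTokens txt) [] PySem.Dict.empty
    (by intro w; simp [PySem.Dict.getD_empty])
  simp only [List.nil_append] at h1 h2
  simp only [pvF3, pvF5, PySem.List.enumerate, List.filter_nil, List.map_nil] at h1 h2 ⊢
  rw [h1, h2]
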